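-- pv_equiv track=rewrite | github.com/Lvdmv/Python-practice | 21_Tuples/06_pairs/main.py | pair_tuple
-- ===== SOURCE A (Python) =====
-- def pair_tuple(my_list):
--    tuple_even = []
--    tuple_odd = []
--    for i, j in enumerate(my_list):
--        if i % 2 == 0:
--          tuple_even.append(j)
--        else:
--           tuple_odd.append(j)
--    new_tuple = zip(tuple_even, tuple_odd)
--    new_tuple = list(new_tuple)
--    return new_tuple
-- ===== SOURCE B (Python) =====
-- def pair_tuple(my_list):
--     result = []
--     for i in range(len(my_list) // 2):
--         result.append((my_list[2 * i], my_list[2 * i + 1]))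
--     return result
-- ===== Notes on version B (the rewrite author's own statement) =====
-- stated objective: simpler
-- what changed: B forms each pair directly by stride-2 indexing over range(len//2) instead of splitting the list into even/odd accumulator lists with a parity branch and zipping them.
import Mathlib
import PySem

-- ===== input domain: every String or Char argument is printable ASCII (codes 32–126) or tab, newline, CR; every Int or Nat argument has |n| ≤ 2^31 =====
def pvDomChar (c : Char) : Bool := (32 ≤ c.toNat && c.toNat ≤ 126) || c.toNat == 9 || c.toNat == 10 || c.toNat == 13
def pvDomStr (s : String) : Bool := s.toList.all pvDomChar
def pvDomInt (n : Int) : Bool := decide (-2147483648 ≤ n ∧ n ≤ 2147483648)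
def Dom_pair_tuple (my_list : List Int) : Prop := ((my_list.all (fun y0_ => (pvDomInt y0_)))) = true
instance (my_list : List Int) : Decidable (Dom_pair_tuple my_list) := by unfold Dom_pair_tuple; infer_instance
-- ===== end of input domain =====

-- B forms pairs directly by stride-2 indexing over range(len//2); simpler than A's parity split + zip.
-- ===== PORT A =====
def pair_tuple (my_list : List Int) : List (Int × Int) :=
  let p := (PySem.List.enumerate my_list 0).foldl
    (fun (acc : List Int × List Int) ij =>
      if PySem.Int.mod ij.1 2 == 0 then (acc.1 ++ [ij.2], acc.2)
      else (acc.1, acc.2 ++ [ij.2]))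
    ([], [])
  p.1.zip p.2

-- ===== PORT B =====
-- indices 2*i and 2*i+1 are always in range for i < len // 2, so pyGetD's default 0 is never used
def pair_tuple_alt (my_list : List Int) : List (Int × Int) :=
  (PySem.List.pyRange 0 (PySem.Int.floordiv (my_list.length : Int) 2) 1).foldl
    (fun acc i =>
      acc ++ [(PySem.List.pyGetD my_list (2 * i) 0, PySem.List.pyGetD my_list (2 * i + 1) 0)])
    []

-- ===== PRECONDITION & SPEC =====
def Spec_pair_tuple (my_list : List Int) (out : List (Int × Int)) : Prop := out = pair_tuple_alt my_list
instance (my_list : List Int) (out : List (Int × Int)) : Decidable (Spec_pair_tuple my_list out) := by unfold Spec_pair_tuple; infer_instance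

-- ===== CLAIM (what is proved, stated in full; the proofs are below) =====
def Claim_equal_pair_tuple : Prop := ∀ (my_list : List Int), Dom_pair_tuple my_list → Spec_pair_tuple my_list (pair_tuple my_list)

-- ===== LEMMAS AND PROOFS =====

-- the common normal form: consecutive pairs
def pvPairs : List Int → List (Int × Int)
  | a :: b :: r => (a, b) :: pvPairs r
  | _ => []

mutual
def pvEvens : List Int → List Int
  | [] => []
  | a :: r => a :: pvOdds r
def pvOdds : List Int → List Int
  | [] => []
  | _ :: r => pvEvens r
end

theorem pvLoopA (l : List Int) : ∀ (k : Int) (e o : List Int), 0 ≤ k →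
    (PySem.List.enumerate l k).foldl
      (fun (acc : List Int × List Int) ij =>
        if PySem.Int.mod ij.1 2 == 0 then (acc.1 ++ [ij.2], acc.2)
        else (acc.1, acc.2 ++ [ij.2])) (e, o) =
    (if k % 2 = 0 then (e ++ pvEvens l, o ++ pvOdds l)
     else (e ++ pvOdds l, o ++ pvEvens l)) := by
  induction l with
  | nil => intro k e o hk; simp [PySem.List.enumerate_nil, pvEvens, pvOdds]
  | cons a r ih =>
    intro k e o hk
    rw [PySem.List.enumerate_cons, List.foldl_cons]
    by_cases h : k % 2 = 0
    · have hc : (PySem.Int.mod k 2 == 0) = true := by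
        simp [PySem.Int.mod, Int.fmod_eq_emod, h]
      rw [hc, if_pos rfl, ih (k + 1) (e ++ [a]) o (by omega), if_pos h,
          if_neg (by omega)]
      simp [pvEvens, pvOdds]
    · have hc : (PySem.Int.mod k 2 == 0) = false := by
        simp [PySem.Int.mod, Int.fmod_eq_emod, h]
      rw [hc, if_neg (by simp), ih (k + 1) e (o ++ [a]) (by omega), if_neg h,
          if_pos (by omega)]
      simp [pvEvens, pvOdds]

theorem pvZipPairs (l : List Int) : (pvEvens l).zip (pvOdds l) = pvPairs l := by
  induction l using pvPairs.induct with
  | case1 a b r ih => simp [pvEvens, pvOdds, pvPairs, ih]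
  | case2 t h =>
    match t, h with
    | [], _ => simp [pvEvens, pvOdds, pvPairs]
    | [a], _ => simp [pvEvens, pvOdds, pvPairs]
    | a :: b :: r, h => exact absurd rfl (h a b r)

theorem pvA_eq_pairs (l : List Int) : pair_tuple l = pvPairs l := by
  unfold pair_tuple
  simp only [pvLoopA l 0 [] [] (by omega)]
  simp [pvZipPairs]

theorem pvFoldlApp (g : Int → Int × Int) (xs : List Int) :
    ∀ init, xs.foldl (fun acc i => acc ++ [g i]) init = init ++ xs.map g := by
  induction xs with
  | nil => simp
  | cons x r ih => intro init; simp [ih]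

theorem pvB_map (t : List Int) : pair_tuple_alt t =
    (List.range (t.length / 2)).map
      (fun n => (PySem.List.pyGetD t ((2 * n : Nat) : Int) 0,
                 PySem.List.pyGetD t ((2 * n + 1 : Nat) : Int) 0)) := by
  unfold pair_tuple_alt
  rw [pvFoldlApp]
  have hfd : PySem.Int.floordiv ((t.length : Nat) : Int) 2 = ((t.length / 2 : Nat) : Int) := by
    simp only [PySem.Int.floordiv, Int.fdiv_eq_ediv]
    omega
  rw [hfd, PySem.List.pyRange_zero_natCast, List.map_map, List.nil_append]
  apply List.map_congr_left
  intro n _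
  simp only [Function.comp_apply]
  push_cast
  rfl

theorem pvB_eq_pairs (l : List Int) : pair_tuple_alt l = pvPairs l := by
  induction l using pvPairs.induct with
  | case1 a b r ih =>
    rw [pvB_map] at ih ⊢
    have hlen : (a :: b :: r).length / 2 = r.length / 2 + 1 := by simp; omega
    rw [hlen, List.range_succ_eq_map, List.map_cons, List.map_map, pvPairs]
    congr 1
    · simp only [show 2 * 0 = 0 from rfl,
        PySem.List.pyGetD_natCast, List.getD_cons_succ, List.getD_cons_zero]
    · rw [← ih]
      apply List.map_congr_left
      intro n _
      simp only [Function.comp_apply]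
      rw [show 2 * (n + 1) = 2 * n + 1 + 1 from by ring]
      simp only [PySem.List.pyGetD_natCast, List.getD_cons_succ]
  | case2 t h =>
    match t, h with
    | [], _ => rfl
    | [a], _ => rfl
    | a :: b :: r, h => exact absurd rfl (h a b r)

-- ===== VERDICT (by name: the statement is the Claim_ definition above) =====
theorem pair_tuple_spec : Claim_equal_pair_tuple := by
  intro l _
  unfold Spec_pair_tuple
  rw [pvA_eq_pairs, pvB_eq_pairs]
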